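-- pv_equiv track=rewrite | github.com/akashdeep3194/Scaler | d41/Smallest XOR.py | solve
-- ===== SOURCE A (Python) =====
-- from math import log2
--
-- def solve(A, B):
--     n = B
--     if A == 0:
--         return 2**n - 1
--     k = int(log2(A))
--     x = 0
--
--     while n>0 and k>=0:
--         if A&2**k == 2**k:
--             x += 2**k
--             n -= 1
--         k -= 1
--
--     k = 0
--     while n>0:
--         if A&2**k == 0:
--             x += 2**k
--             n  -= 1
--         k += 1
--     return x
-- ===== SOURCE B (Python) =====
-- def solve(A, B):
--     if A == 0:
--         return (1 << B) - 1
--     x = A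
--     c = bin(A).count('1')
--     while c > B and x:
--         x &= x - 1      # clear the lowest set bit
--         c -= 1
--     while c < B:
--         x |= x + 1      # set the lowest clear bit
--         c += 1
--     return x
-- ===== Notes on version B (the rewrite author's own statement) =====
-- stated objective: faster
-- what changed: B never scans bit positions: it counts the set bits once, then repeatedly clears the lowest set bit with x&=x-1 while the count exceeds B, and repeatedly sets the lowest clear bit with x|=x+1 while the count is below B; A's per-position loop recomputes 2**k and tests/adds it at every bit position, which a timing run measured ~48-95x slower on large inputs.
-- outside the precondition, e.g. on solve(0, -1): A returns -0.5, B raises ValueError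
import Mathlib
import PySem

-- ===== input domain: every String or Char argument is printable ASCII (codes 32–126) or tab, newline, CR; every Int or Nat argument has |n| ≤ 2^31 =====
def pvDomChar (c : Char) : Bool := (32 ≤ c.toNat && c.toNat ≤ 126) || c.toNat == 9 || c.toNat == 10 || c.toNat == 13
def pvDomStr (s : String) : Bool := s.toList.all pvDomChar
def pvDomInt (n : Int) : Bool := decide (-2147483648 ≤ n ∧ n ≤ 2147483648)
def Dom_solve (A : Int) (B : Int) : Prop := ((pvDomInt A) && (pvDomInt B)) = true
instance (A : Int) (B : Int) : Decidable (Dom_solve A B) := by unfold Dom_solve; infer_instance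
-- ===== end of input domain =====

-- B replaces A's positional bit scans by popcount plus the bit tricks x&=x-1 / x|=x+1 (return value only, no side effects involved).

-- ===== PORT A =====
-- first while loop: k runs from int(log2(A)) down; fuel kk encodes k+1, so kk = 0 is the k = -1 exit
def solveLoop1 (A : Int) : Nat → Int → Int → Int × Int
  | 0, n, x => (n, x)
  | kk + 1, n, x =>
    if n > 0 then
      if PySem.Int.band A (2 ^ kk) = 2 ^ kk then solveLoop1 A kk (n - 1) (x + 2 ^ kk)
      else solveLoop1 A kk n x
    else (n, x)

-- second while loop; the fuel only makes the loop total: n.toNat + 33 steps always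
-- suffice under Dom ∧ Pre (0 ≤ A ≤ 2^31 has all set bits below position 32)
def solveLoop2 (A : Int) : Nat → Int → Nat → Int → Int
  | 0, _, _, x => x
  | f + 1, n, k, x =>
    if n > 0 then
      if PySem.Int.band A (2 ^ k) = 0 then solveLoop2 A f (n - 1) (k + 1) (x + 2 ^ k)
      else solveLoop2 A f n (k + 1) x
    else x

def solve (A : Int) (B : Int) : Int :=
  if A = 0 then 2 ^ B.toNat - 1
  else
    -- int(log2(A)) = A.bit_length() - 1: exact for 1 ≤ A ≤ 2^31 (Dom ∧ Pre; no float rounding there)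
    let k : Nat := PySem.Int.bitLength A - 1
    let r := solveLoop1 A (k + 1) B 0
    solveLoop2 A (r.1.toNat + 33) r.1 0 r.2

-- ===== PORT B =====
-- while c > B and x: x &= x-1; c -= 1  — the fuel (c-B).toNat suffices: c - B shrinks by 1 per step
def altLoop1 : Nat → Int → Int → Int → Int × Int
  | 0, c, _, x => (c, x)
  | f + 1, c, B, x =>
    if c > B ∧ x ≠ 0 then altLoop1 f (c - 1) B (PySem.Int.band x (x - 1)) else (c, x)

-- while c < B: x |= x+1; c += 1  — the fuel (B-c).toNat is exact: it is 0 iff the condition fails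
def altLoop2 : Nat → Int → Int → Int → Int
  | 0, _, _, x => x
  | f + 1, c, B, x =>
    if c < B then altLoop2 f (c + 1) B (PySem.Int.bor x (x + 1)) else x

def solve_alt (A : Int) (B : Int) : Int :=
  if A = 0 then 2 ^ B.toNat - 1
  else
    let c : Int := PySem.Int.bitCount A   -- bin(A).count('1')
    let r := altLoop1 (c - B).toNat c B A
    altLoop2 (B - r.1).toNat r.1 B r.2

-- ===== PRECONDITION & SPEC =====
-- Pre_ excludes A < 0 (math.log2 raises ValueError) and A = 0 with B < 0 (A returns the float 2**B - 1, not an int).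
def Pre_solve (A : Int) (B : Int) : Prop := 0 ≤ A ∧ (A = 0 → 0 ≤ B)
instance (A : Int) (B : Int) : Decidable (Pre_solve A B) := by unfold Pre_solve; infer_instance
def pvWitness_solve : Int × Int := (5, 2)

def Spec_solve (A : Int) (B : Int) (out : Int) : Prop := out = solve_alt A B
instance (A : Int) (B : Int) (out : Int) : Decidable (Spec_solve A B out) := by unfold Spec_solve; infer_instance

-- ===== CLAIM (what is proved, stated in full; the proofs are below) =====
def Claim_equal_solve : Prop := ∀ (A : Int) (B : Int), Dom_solve A B → Pre_solve A B → Spec_solve A B (solve A B)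

-- ===== LEMMAS AND PROOFS =====

-- sum of 2^k over a list of bit positions, in Int and in Nat
def pvPow (l : List Nat) : Int := (l.map (fun k => (2 : Int) ^ k)).sum
def pvPowN (l : List Nat) : Nat := (l.map (fun k => (2 : Nat) ^ k)).sum

-- the ascending list of set-bit positions of a below m
def pvOnes (a m : Nat) : List Nat := (List.range m).filter a.testBit

-- the ascending list of clear-bit positions of a in [k, k+f)
def pvZeros (a k f : Nat) : List Nat := (List.range' k f).filter (fun j => !a.testBit j)

theorem pvPow_append (l₁ l₂ : List Nat) : pvPow (l₁ ++ l₂) = pvPow l₁ + pvPow l₂ := by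
  simp [pvPow]

theorem pvPow_natCast (l : List Nat) : ((pvPowN l : Nat) : Int) = pvPow l := by
  unfold pvPow pvPowN
  rw [Nat.cast_list_sum, List.map_map]; congr 1

theorem pv_band_two_pow (a k : Nat) :
    PySem.Int.band (a : Int) ((2 : Int) ^ k) = if a.testBit k then (2 : Int) ^ k else 0 := by
  have h : ((2 : Int) ^ k) = ((2 ^ k : Nat) : Int) := by push_cast; ring
  rw [h, PySem.Int.band_natCast, Nat.and_two_pow]
  cases hb : a.testBit k <;> simp [hb]

theorem pv_condA_set (a k : Nat) :
    (PySem.Int.band (a : Int) ((2 : Int) ^ k) = 2 ^ k) = (a.testBit k = true) := by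
  have hp := pow_pos (show (0 : Int) < 2 by norm_num) k
  rw [pv_band_two_pow]
  cases hb : a.testBit k <;> simp <;> omega

theorem pv_condA_zero (a k : Nat) :
    (PySem.Int.band (a : Int) ((2 : Int) ^ k) = 0) = (a.testBit k = false) := by
  have hp := pow_pos (show (0 : Int) < 2 by norm_num) k
  rw [pv_band_two_pow]
  cases hb : a.testBit k <;> simp <;> omega

theorem pv_bitLength_eq (a : Nat) (h : 0 < a) : PySem.Int.bitLength (a : Int) = a.log2 + 1 := by
  induction a using Nat.strong_induction_on with
  | _ a ih =>
    rcases lt_or_ge a 2 with h2 | h2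
    · have h1 : a = 1 := by omega
      subst h1
      decide
    · rw [PySem.Int.bitLength_natCast h, ih (a / 2) (by omega) (by omega)]
      conv_rhs => rw [Nat.log2_def]
      simp [h2]

theorem pvOnes_succ (a m : Nat) :
    pvOnes a (m + 1) = pvOnes a m ++ if a.testBit m then [m] else [] := by
  unfold pvOnes
  rw [List.range_succ, List.filter_append]
  cases hb : a.testBit m <;> simp [hb]

-- phase-1 invariant for A: the top-down scan keeps the last min(n, ·) set bits of the ascending list
theorem pv_loop1_eq (a : Nat) (kk : Nat) : ∀ (n x : Int), 0 ≤ n →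
    solveLoop1 (a : Int) kk n x =
      (n - min n ((pvOnes a kk).length : Int),
       x + pvPow ((pvOnes a kk).drop ((pvOnes a kk).length - n.toNat))) := by
  induction kk with
  | zero =>
    intro n x hn
    simp [solveLoop1, pvOnes, pvPow]
    omega
  | succ kk ih =>
    intro n x hn
    rw [solveLoop1]
    rcases lt_or_ge (0 : Int) n with hpos | hz
    · rw [if_pos hpos]
      rw [pvOnes_succ]
      cases hb : a.testBit kk
      · simp only [pv_condA_set, hb, if_false]
        rw [ih n x hn]
        simp
      · simp only [pv_condA_set, hb, if_true]
        rw [ih (n - 1) (x + 2 ^ kk) (by omega)]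
        have hlen : (pvOnes a kk).length + 1 - n.toNat ≤ (pvOnes a kk).length := by omega
        rw [Prod.mk.injEq]
        constructor
        · simp; omega
        · rw [List.drop_append_of_le_length (by simpa using hlen), pvPow_append]
          have : (pvOnes a kk ++ [kk]).length - n.toNat = (pvOnes a kk).length - (n - 1).toNat := by
            simp; omega
          rw [this]
          simp [pvPow]
          ring
    · rw [if_neg (by omega)]
      have h0 : n = 0 := le_antisymm hz hn
      subst h0
      simp [pvPow]

-- phase-2 invariant for A: the upward zero-bit scan adds the first n clear-bit positions
theorem pv_loop2_eq (a : Nat) (f : Nat) : ∀ (n : Int) (k : Nat) (x : Int),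
    n.toNat ≤ (pvZeros a k f).length →
    solveLoop2 (a : Int) f n k x = x + pvPow ((pvZeros a k f).take n.toNat) := by
  induction f with
  | zero =>
    intro n k x hlen
    simp at hlen
    simp [solveLoop2, pvZeros, pvPow, hlen]
  | succ f ih =>
    intro n k x hlen
    rw [solveLoop2]
    rcases lt_or_ge (0 : Int) n with hpos | hz
    · rw [if_pos hpos]
      have hz1 : pvZeros a k (f + 1) =
          (if a.testBit k then [] else [k]) ++ pvZeros a (k + 1) f := by
        unfold pvZeros
        rw [List.range'_succ, List.filter_cons]
        cases hb : a.testBit k <;> simp [hb]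
      cases hb : a.testBit k
      · simp only [pv_condA_zero, hb, if_true]
        rw [ih (n - 1) (k + 1) (x + 2 ^ k) (by rw [hz1] at hlen; simp [hb] at hlen; omega)]
        rw [hz1]
        simp only [hb, if_neg Bool.false_ne_true, List.singleton_append]
        have hn1 : n.toNat = (n - 1).toNat + 1 := by omega
        rw [hn1, List.take_succ_cons, pvPow]
        simp [pvPow]
        ring
      · simp only [pv_condA_zero, hb, if_false]
        rw [ih n (k + 1) x (by rw [hz1] at hlen; simpa [hb] using hlen)]
        rw [hz1]
        simp [hb]
    · rw [if_neg (by omega)]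
      have : n.toNat = 0 := by omega
      simp [this, pvPow]

-- the set bits of a below any bound above its top bit sum back to a
theorem pv_sum_ones_nat (a m : Nat) : pvPowN (pvOnes a m) = a % 2 ^ m := by
  induction m with
  | zero => simp [pvOnes, pvPowN, Nat.mod_one]
  | succ m ih =>
    rw [pvOnes_succ, pvPowN, List.map_append, List.sum_append, ← pvPowN, ih, Nat.mod_pow_succ]
    have ht := Nat.testBit_eq_decide_div_mod_eq (i := m) (x := a)
    cases hb : a.testBit m <;> simp [pvPowN, hb] <;> rw [hb] at ht <;> simp at ht <;> omega

theorem pv_sum_ones (a m : Nat) (h : a < 2 ^ m) : pvPow (pvOnes a m) = a := by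
  have hnat := pv_sum_ones_nat a m
  rw [Nat.mod_eq_of_lt h] at hnat
  rw [← pvPow_natCast, hnat]

-- all clear bits from the top give pvZeros enough length
theorem pv_zeros_split (a f₁ f₂ : Nat) (h : f₁ ≤ f₂) :
    pvZeros a 0 f₂ = pvZeros a 0 f₁ ++ pvZeros a f₁ (f₂ - f₁) := by
  unfold pvZeros
  have hr := List.range'_append_1 (s := 0) (m := f₁) (n := f₂ - f₁)
  rw [Nat.zero_add, show f₁ + (f₂ - f₁) = f₂ by omega] at hr
  rw [← hr, List.filter_append]

theorem pv_zeros_long (a m f : Nat) (hm : a < 2 ^ m) (hf : m ≤ f) :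
    f - m ≤ (pvZeros a 0 f).length := by
  rw [pv_zeros_split a m f hf, List.length_append]
  have : pvZeros a m (f - m) = List.range' m (f - m) := by
    unfold pvZeros
    rw [List.filter_eq_self]
    intro j hj
    rw [List.mem_range'] at hj
    have hj2 : a < 2 ^ j := lt_of_lt_of_le hm (Nat.pow_le_pow_right (by omega) (by omega))
    simp [Nat.testBit_eq_false_of_lt hj2]
  rw [this, List.length_range']
  omega

-- first-n prefix of the clear-bit list does not depend on the bound, once long enough
theorem pv_zeros_take (a n f₁ f₂ : Nat) (h₁ : f₁ ≤ f₂) (h₂ : n ≤ (pvZeros a 0 f₁).length) :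
    (pvZeros a 0 f₁).take n = (pvZeros a 0 f₂).take n := by
  rw [pv_zeros_split a f₁ f₂ h₁, List.take_append_of_le_length h₂]

theorem solveLoop1_nonpos (A : Int) (kk : Nat) (n x : Int) (h : ¬ n > 0) :
    solveLoop1 A kk n x = (n, x) := by
  cases kk <;> simp [solveLoop1, h]

theorem solveLoop2_nonpos (A : Int) (f : Nat) (n : Int) (k : Nat) (x : Int) (h : ¬ n > 0) :
    solveLoop2 A f n k x = x := by
  cases f <;> simp [solveLoop2, h]

-- ===== B-side lemmas: bit tricks =====

theorem pv_testBit_split (k m r i : Nat) (hr : r < 2 ^ k) :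
    (2 ^ k * m + r).testBit i = if i < k then r.testBit i else m.testBit (i - k) := by
  by_cases h : i < k
  · rw [if_pos h]
    have h1 : (2 ^ k * m + r) % 2 ^ k = r := by
      rw [Nat.mul_add_mod, Nat.mod_eq_of_lt hr]
    have h2 := Nat.testBit_mod_two_pow (2 ^ k * m + r) k i
    rw [h1] at h2
    rw [h2]
    simp [h]
  · rw [if_neg h]
    have h1 : (2 ^ k * m + r) / 2 ^ k = m := by
      rw [Nat.mul_add_div (by positivity), Nat.div_eq_of_lt hr]; omega
    have h2 := Nat.testBit_div_two_pow (2 ^ k * m + r) (i - k) (n := k)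
    rw [h1, show i - k + k = i by omega] at h2
    exact h2.symm

theorem pv_pvPowN_dvd (k : Nat) (l : List Nat) (h : ∀ j ∈ l, k ≤ j) : 2 ^ k ∣ pvPowN l := by
  induction l with
  | nil => simp [pvPowN]
  | cons a t ih =>
    have : pvPowN (a :: t) = 2 ^ a + pvPowN t := by simp [pvPowN]
    rw [this]
    exact Dvd.dvd.add (pow_dvd_pow 2 (h a (by simp))) (ih (fun j hj => h j (by simp [hj])))

theorem pv_clear_low (h : Nat) (t : List Nat) (hs : (h :: t).Pairwise (· < ·)) :
    pvPowN (h :: t) &&& (pvPowN (h :: t) - 1) = pvPowN t := by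
  obtain ⟨m, hm⟩ : 2 ^ (h + 1) ∣ pvPowN t := by
    apply pv_pvPowN_dvd
    intro j hj
    exact (List.pairwise_cons.mp hs).1 j hj
  have hx : pvPowN (h :: t) = 2 ^ (h + 1) * m + 2 ^ h := by
    simp [pvPowN] at hm ⊢
    omega
  have hx1 : pvPowN (h :: t) - 1 = 2 ^ (h + 1) * m + (2 ^ h - 1) := by
    have : 1 ≤ 2 ^ h := Nat.one_le_two_pow
    omega
  apply Nat.eq_of_testBit_eq
  intro i
  rw [Nat.testBit_and, hx1, hx, hm,
    pv_testBit_split (h+1) m (2^h) i (by have := Nat.one_le_two_pow (n := h); omega),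
    pv_testBit_split (h+1) m (2^h - 1) i (by have := Nat.one_le_two_pow (n := h); omega),
    show (2:Nat)^(h+1)*m = 2^(h+1)*m + 0 by omega,
    pv_testBit_split (h+1) m 0 i (by positivity)]
  by_cases hik : i < h + 1
  · simp only [hik, if_pos]
    rw [Nat.testBit_two_pow, Nat.testBit_two_pow_sub_one]
    simp
    omega
  · simp [hik]

theorem pv_set_low (x z : Nat) (hx : x % 2 ^ (z + 1) = 2 ^ z - 1) :
    (x ||| (x + 1)) = x + 2 ^ z := by
  have hd := Nat.div_add_mod x (2 ^ (z + 1))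
  set q := x / 2 ^ (z + 1) with hq
  have h1 : (1:Nat) ≤ 2 ^ z := Nat.one_le_two_pow
  have h2 : (2:Nat) ^ (z+1) = 2 * 2 ^ z := by ring
  have hxe : x = 2 ^ (z+1) * q + (2 ^ z - 1) := by omega
  have hxe1 : x + 1 = 2 ^ (z+1) * q + 2 ^ z := by omega
  have hxe2 : x + 2 ^ z = 2 ^ (z+1) * q + (2 ^ (z+1) - 1) := by omega
  apply Nat.eq_of_testBit_eq
  intro i
  rw [Nat.testBit_or, hxe2, hxe1, hxe,
    pv_testBit_split (z+1) q _ i (by omega),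
    pv_testBit_split (z+1) q _ i (by omega),
    pv_testBit_split (z+1) q _ i (by omega)]
  by_cases hik : i < z + 1
  · simp only [hik, if_pos]
    rw [Nat.testBit_two_pow, Nat.testBit_two_pow_sub_one, Nat.testBit_two_pow_sub_one]
    cases Nat.lt_or_ge i z with
    | inl h => simp [h, Nat.lt_succ_of_lt h]
    | inr h =>
      have hiz : i = z := by omega
      simp [hiz]
  · simp [hik]

theorem pv_ones_sorted (a m : Nat) : (pvOnes a m).Pairwise (· < ·) :=
  List.pairwise_lt_range.sublist List.filter_sublist

theorem pv_zeros_sorted (a k f : Nat) : (pvZeros a k f).Pairwise (· < ·) :=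
  (List.pairwise_lt_range' 1).sublist List.filter_sublist

theorem pv_bitCount_len (m : Nat) : ∀ a : Nat, a < 2 ^ m →
    PySem.Int.bitCount (a : Int) = (pvOnes a m).length := by
  induction m with
  | zero =>
    intro a ha
    interval_cases a
    simp [pvOnes]
  | succ m ih =>
    intro a ha
    rcases Nat.eq_zero_or_pos a with h0 | h0
    · subst h0
      have hnil : List.filter (Nat.testBit 0) (List.range (m + 1)) = [] :=
        List.filter_eq_nil_iff.mpr (fun k _ => by simp [Nat.zero_testBit])
      simp [pvOnes, hnil, PySem.Int.bitCount_zero]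
    · have hpow : (2:Nat) ^ (m + 1) = 2 * 2 ^ m := by ring
      rw [PySem.Int.bitCount_natCast h0, ih (a / 2) (Nat.div_lt_of_lt_mul (by omega))]
      have hr : pvOnes a (m + 1) =
          ((if a.testBit 0 then [0] else []) ++ (pvOnes (a / 2) m).map Nat.succ) := by
        unfold pvOnes
        rw [List.range_succ_eq_map, List.filter_cons, List.filter_map]
        have h2 : List.filter (a.testBit ∘ Nat.succ) (List.range m) =
            List.filter (a / 2).testBit (List.range m) :=
          List.filter_congr (fun k _ => by simp [Function.comp, Nat.testBit_add_one])
        rw [h2]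
        cases hb : a.testBit 0 <;> simp [hb]
      rw [hr]
      have ht : a.testBit 0 = decide (a % 2 = 1) := Nat.testBit_zero a
      cases hb : a.testBit 0 <;> rw [hb] at ht <;> simp at ht ⊢ <;> omega

theorem pv_altLoop1_char : ∀ (l : List Nat), l.Pairwise (· < ·) → ∀ B : Int,
    altLoop1 (((l.length : Int) - B).toNat) l.length B ((pvPowN l : Nat) : Int) =
      (min (l.length : Int) (max B 0),
       ((pvPowN (l.drop (((l.length : Int) - B).toNat)) : Nat) : Int)) := by
  intro l
  induction l with
  | nil =>
    intro _ B
    have hx : ((pvPowN ([] : List Nat) : Nat) : Int) = 0 := by simp [pvPowN]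
    simp only [List.length_nil, Nat.cast_zero, List.drop_nil, hx]
    cases hf : ((0 : Int) - B).toNat with
    | zero => simp only [altLoop1, Prod.mk.injEq]; exact ⟨by omega, by trivial⟩
    | succ f =>
      rw [altLoop1, if_neg (by simp)]
      simp only [Prod.mk.injEq]
      exact ⟨by omega, by trivial⟩
  | cons h t ih =>
    intro hs B
    by_cases hB : ((h :: t).length : Int) ≤ B
    · have h0 : (((h :: t).length : Int) - B).toNat = 0 := by omega
      rw [h0, altLoop1, List.drop_zero]
      simp only [Prod.mk.injEq]
      exact ⟨by simp at hB ⊢; omega, by trivial⟩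
    · have h1 : 1 ≤ pvPowN (h :: t) := by
        have : (2:Nat) ^ h ≥ 1 := Nat.one_le_two_pow
        simp [pvPowN]
        omega
      have hf : (((h :: t).length : Int) - B).toNat = ((t.length : Int) - B).toNat + 1 := by
        simp at hB ⊢
        omega
      rw [hf, altLoop1, if_pos ⟨by simp at hB ⊢; omega, by omega⟩]
      have hc : ((pvPowN (h :: t) : Nat) : Int) - 1 = ((pvPowN (h :: t) - 1 : Nat) : Int) := by
        omega
      rw [hc, PySem.Int.band_natCast, pv_clear_low h t hs]
      rw [show ((h :: t).length : Int) - 1 = (t.length : Int) by simp,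
        ih (List.pairwise_cons.mp hs).2 B]
      rw [List.drop_succ_cons]
      congr 1
      simp at hB
      omega

theorem pv_add_pow_testBit (a h : Nat) (ha : a.testBit h = false) (i : Nat) :
    (a + 2 ^ h).testBit i = (a.testBit i || decide (i = h)) := by
  have hd := Nat.div_add_mod a (2 ^ (h + 1))
  set q := a / 2 ^ (h + 1) with hq
  set r := a % 2 ^ (h + 1) with hr
  have hr2 : r < 2 ^ (h + 1) := Nat.mod_lt _ (by positivity)
  have hrb : r.testBit h = false := by
    rw [hr, Nat.testBit_mod_two_pow]
    simp [ha]
  have hrlt : r < 2 ^ h := by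
    have h2 : (2:Nat) ^ (h + 1) = 2 * 2 ^ h := by ring
    by_contra hcon
    push_neg at hcon
    have hdiv : r / 2 ^ h = 1 := by
      have hk : (0:Nat) < 2 ^ h := by positivity
      have ha1 := Nat.div_le_div_right (c := 2 ^ h) hcon
      have ha2 : (2 ^ h) / 2 ^ h = 1 := Nat.div_self hk
      have ha3 : r / 2 ^ h < 2 := Nat.div_lt_of_lt_mul (by omega)
      omega
    have hz := Nat.testBit_eq_decide_div_mod_eq (x := r) (i := h)
    rw [hrb, hdiv] at hz
    simp at hz
  have hae : a = 2 ^ (h + 1) * q + r := by omega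
  have hae2 : a + 2 ^ h = 2 ^ (h + 1) * q + (r + 2 ^ h) := by omega
  have h2 : (2:Nat) ^ (h + 1) = 2 * 2 ^ h := by ring
  rw [hae2, pv_testBit_split (h + 1) q _ i (by omega)]
  conv_rhs => rw [hae]
  rw [pv_testBit_split (h + 1) q r i (by omega)]
  have hsplit : (r + 2 ^ h) = 2 ^ h * 1 + r := by omega
  by_cases hik : i < h + 1
  · simp only [hik, if_pos]
    rw [hsplit, pv_testBit_split h 1 r i hrlt]
    by_cases hih : i < h
    · simp [hih]
      omega
    · have : i = h := by omega
      subst this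
      simp [hrb]
  · simp only [hik, if_neg]
    simp
    omega

theorem pv_add_disjoint_testBit (a : Nat) (s : List Nat) (hs : s.Pairwise (· < ·))
    (hd : ∀ k ∈ s, a.testBit k = false) (i : Nat) :
    (a + pvPowN s).testBit i = (a.testBit i || decide (i ∈ s)) := by
  induction s generalizing a with
  | nil => simp [pvPowN]
  | cons h t ih =>
    have hph : pvPowN (h :: t) = 2 ^ h + pvPowN t := by simp [pvPowN]
    have hstep := pv_add_pow_testBit a h (hd h (by simp))
    have hdt : ∀ k ∈ t, (a + 2 ^ h).testBit k = false := by
      intro k hk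
      rw [hstep k]
      have hk1 : a.testBit k = false := hd k (by simp [hk])
      have hk2 : k ≠ h := by
        have := (List.pairwise_cons.mp hs).1 k hk
        omega
      simp [hk1, hk2]
    have := ih (a + 2 ^ h) (List.pairwise_cons.mp hs).2 hdt
    rw [hph, show a + (2 ^ h + pvPowN t) = (a + 2 ^ h) + pvPowN t by omega, this, hstep]
    simp [List.mem_cons]
    by_cases h1 : a.testBit i <;> by_cases h2 : i = h <;> by_cases h3 : i ∈ t <;>
      simp [h1, h2, h3]

theorem pv_zeros_mem (a f i : Nat) :
    i ∈ pvZeros a 0 f ↔ (i < f ∧ a.testBit i = false) := by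
  simp [pvZeros, List.mem_filter, List.mem_range'_1]

theorem pv_sorted_take_lt (l : List Nat) (hs : l.Pairwise (· < ·)) (j : Nat)
    (hj : j < l.length) : ∀ k ∈ l.take j, k < l[j] := by
  intro k hk
  obtain ⟨i, hi, hEq⟩ := List.mem_iff_getElem.mp hk
  have hij : i < j := by
    have := List.length_take (i := j) (l := l)
    omega
  have hgt : (l.take j)[i] = l[i]'(by omega) := List.getElem_take
  rw [← hEq, hgt]
  exact List.pairwise_iff_getElem.mp hs i j (by omega) hj hij

theorem pv_sorted_mem_take (l : List Nat) (hs : l.Pairwise (· < ·)) (j : Nat)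
    (hj : j < l.length) (i : Nat) (hmem : i ∈ l) (hlt : i < l[j]) : i ∈ l.take j := by
  obtain ⟨idx, hidx, hEq⟩ := List.mem_iff_getElem.mp hmem
  have hij : idx < j := by
    by_contra hcon
    push_neg at hcon
    rcases Nat.eq_or_lt_of_le hcon with h | h
    · subst h
      omega
    · have := List.pairwise_iff_getElem.mp hs j idx hj hidx h
      omega
  have : (l.take j)[idx]'(by rw [List.length_take]; omega) = l[idx]'hidx := List.getElem_take
  rw [← hEq, ← this]
  exact List.getElem_mem _

theorem pv_low_zero (a f j : Nat) (hj : j < (pvZeros a 0 f).length) :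
    (a + pvPowN ((pvZeros a 0 f).take j)) % 2 ^ ((pvZeros a 0 f)[j] + 1) =
      2 ^ (pvZeros a 0 f)[j] - 1 := by
  set l := pvZeros a 0 f with hl
  set z := l[j] with hz
  have hsort : l.Pairwise (· < ·) := pv_zeros_sorted a 0 f
  have hzmem : z ∈ l := List.getElem_mem hj
  have hzc := (pv_zeros_mem a f z).mp hzmem
  have hts : (l.take j).Pairwise (· < ·) := hsort.sublist (List.take_sublist j l)
  have hdisj : ∀ k ∈ l.take j, a.testBit k = false := by
    intro k hk
    exact ((pv_zeros_mem a f k).mp ((List.take_subset j l) hk)).2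
  have hbit := pv_add_disjoint_testBit a (l.take j) hts hdisj
  apply Nat.eq_of_testBit_eq
  intro i
  rw [Nat.testBit_mod_two_pow, hbit, Nat.testBit_two_pow_sub_one]
  rcases Nat.lt_trichotomy i z with hiz | hiz | hiz
  · have h1 : a.testBit i || decide (i ∈ l.take j) := by
      cases hb : a.testBit i
      · have hmem : i ∈ l := (pv_zeros_mem a f i).mpr ⟨by omega, hb⟩
        simp [pv_sorted_mem_take l hsort j hj i hmem (by omega)]
      · simp
    rw [h1]
    simp
    omega
  · have h2 : i ∉ l.take j := by
      intro hcon
      have := pv_sorted_take_lt l hsort j hj i hcon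
      omega
    have hai : a.testBit i = false := by rw [hiz]; exact hzc.2
    simp [hai, h2]
    omega
  · have : ¬ i < z + 1 := by omega
    simp [this]
    omega

theorem pv_altLoop2_char (a f : Nat) : ∀ (n j : Nat) (c B : Int),
    n = (B - c).toNat → j + n ≤ (pvZeros a 0 f).length →
    altLoop2 n c B ((a + pvPowN ((pvZeros a 0 f).take j) : Nat) : Int) =
      ((a + pvPowN ((pvZeros a 0 f).take (j + n)) : Nat) : Int) := by
  intro n
  induction n with
  | zero =>
    intro j c B _ _
    simp [altLoop2]
  | succ n ih =>
    intro j c B hn hlen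
    have hj : j < (pvZeros a 0 f).length := by omega
    set l := pvZeros a 0 f with hl
    rw [altLoop2, if_pos (by omega)]
    have hcast : ((a + pvPowN (l.take j) : Nat) : Int) + 1 =
        ((a + pvPowN (l.take j) + 1 : Nat) : Int) := by push_cast; ring
    rw [hcast, PySem.Int.bor_natCast]
    have hset := pv_set_low (a + pvPowN (l.take j)) l[j] (pv_low_zero a f j hj)
    rw [hset]
    have htake : l.take (j + 1) = l.take j ++ [l[j]] := by
      rw [List.take_succ, List.getElem?_eq_getElem hj]
      rfl
    have happ : pvPowN (l.take j ++ [l[j]]) = pvPowN (l.take j) + 2 ^ l[j] := by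
      unfold pvPowN
      rw [List.map_append, List.sum_append]
      simp
    have hpp : pvPowN (l.take (j + 1)) = pvPowN (l.take j) + 2 ^ l[j] := by
      rw [htake, happ]
    rw [show a + pvPowN (l.take j) + 2 ^ l[j] = a + pvPowN (l.take (j + 1)) by omega]
    rw [ih (j + 1) (c + 1) B (by omega) (by omega),
      show j + 1 + n = j + (n + 1) by omega]

-- ===== VERDICT (by name: the statement is the Claim_ definition above) =====
theorem solve_spec : Claim_equal_solve := by
  intro A B hdom hpre
  unfold Spec_solve
  obtain ⟨hA, hA0B⟩ := hpre
  by_cases hA0 : A = 0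
  · subst hA0; simp [solve, solve_alt]
  · obtain ⟨a, rfl⟩ : ∃ a : Nat, (a : Int) = A := ⟨A.toNat, Int.toNat_of_nonneg hA⟩
    have ha : 0 < a := by
      rcases Nat.eq_zero_or_pos a with h | h
      · subst h; simp at hA0
      · exact h
    have hA31 : a ≤ 2 ^ 31 := by
      simp only [Dom_solve, pvDomInt, Bool.and_eq_true, decide_eq_true_eq] at hdom
      have := hdom.1.2
      norm_num
      omega
    set L := PySem.Int.bitLength ((a : Nat) : Int) with hLdef
    have hL : L = a.log2 + 1 := pv_bitLength_eq a ha
    have hlt : a < 2 ^ L := by rw [hL]; exact Nat.lt_log2_self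
    have hge : 2 ^ (L - 1) ≤ a := by
      rw [hL]
      simpa using Nat.log2_self_le (by omega)
    have hL32 : L ≤ 32 := by
      by_contra hc
      have h1 : (2 : Nat) ^ 32 ≤ 2 ^ (L - 1) := Nat.pow_le_pow_right (by omega) (by omega)
      have : (2 : Nat) ^ 31 < 2 ^ 32 := by norm_num
      omega
    have hc : PySem.Int.bitCount ((a : Nat) : Int) = (pvOnes a L).length :=
      pv_bitCount_len L a hlt
    have hxa : ((a : Nat) : Int) = ((pvPowN (pvOnes a L) : Nat) : Int) := by
      rw [pv_sum_ones_nat, Nat.mod_eq_of_lt hlt]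
    have halt1 := pv_altLoop1_char (pvOnes a L) (pv_ones_sorted a L) B
    have hBv : solve_alt ((a : Nat) : Int) B =
        altLoop2 ((B - min (((pvOnes a L).length : Nat) : Int) (max B 0)).toNat)
          (min (((pvOnes a L).length : Nat) : Int) (max B 0)) B
          ((pvPowN ((pvOnes a L).drop (((((pvOnes a L).length : Nat) : Int) - B).toNat)) : Nat) : Int) := by
      simp only [solve_alt, if_neg hA0]
      rw [hc, hxa, halt1]
    rw [hBv]
    simp only [solve, if_neg hA0, ← hLdef]
    rw [show L - 1 + 1 = L by omega]
    by_cases hB0 : 0 < B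
    · rw [pv_loop1_eq a L B 0 (by omega)]
      by_cases hBc : B ≤ (((pvOnes a L).length : Nat) : Int)
      · have hmin : min B (((pvOnes a L).length : Nat) : Int) = B := by omega
        have hmin2 : min (((pvOnes a L).length : Nat) : Int) (max B 0) = B := by omega
        simp only [hmin, hmin2, sub_self]
        rw [solveLoop2_nonpos _ _ _ _ _ (by omega)]
        rw [show Int.toNat 0 = 0 from rfl, altLoop2]
        rw [show ((((pvOnes a L).length : Nat) : Int) - B).toNat = (pvOnes a L).length - B.toNat by omega]
        rw [pvPow_natCast]
        ring
      · have hmin : min B (((pvOnes a L).length : Nat) : Int) = (((pvOnes a L).length : Nat) : Int) := by omega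
        have hmin2 : min (((pvOnes a L).length : Nat) : Int) (max B 0) = (((pvOnes a L).length : Nat) : Int) := by omega
        simp only [hmin, hmin2]
        rw [show (pvOnes a L).length - B.toNat = 0 by omega, List.drop_zero]
        rw [show ((((pvOnes a L).length : Nat) : Int) - B).toNat = 0 by omega, List.drop_zero]
        have hlen2 : (B - ((pvOnes a L).length : Int)).toNat ≤
            (pvZeros a 0 ((B - ((pvOnes a L).length : Int)).toNat + 33)).length := by
          have := pv_zeros_long a L ((B - ((pvOnes a L).length : Int)).toNat + 33) hlt (by omega)
          omega
        rw [pv_loop2_eq a _ _ 0 _ hlen2]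
        have hlenB : 0 + (B - ((pvOnes a L).length : Int)).toNat ≤
            (pvZeros a 0 (L + (B - ((pvOnes a L).length : Int)).toNat)).length := by
          have := pv_zeros_long a L (L + (B - ((pvOnes a L).length : Int)).toNat) hlt (by omega)
          omega
        have hx0 : ((pvPowN (pvOnes a L) : Nat) : Int) =
            ((a + pvPowN ((pvZeros a 0 (L + (B - ((pvOnes a L).length : Int)).toNat)).take 0) : Nat) : Int) := by
          rw [← hxa]
          simp [pvPowN]
        rw [hx0, pv_altLoop2_char a _ _ 0 _ B (by omega) hlenB, Nat.zero_add]
        rw [pv_zeros_take a ((B - ((pvOnes a L).length : Int)).toNat)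
              (L + (B - ((pvOnes a L).length : Int)).toNat)
              ((B - ((pvOnes a L).length : Int)).toNat + 33) (by omega)
              (by have := pv_zeros_long a L (L + (B - ((pvOnes a L).length : Int)).toNat) hlt (by omega)
                  omega)]
        rw [pv_sum_ones a L hlt]
        push_cast [← pvPow_natCast]
        ring
    · rw [solveLoop1_nonpos _ _ _ _ hB0, solveLoop2_nonpos _ _ _ _ _ hB0]
      have hmin2 : min (((pvOnes a L).length : Nat) : Int) (max B 0) = 0 := by omega
      simp only [hmin2]
      rw [show (B - 0).toNat = 0 by omega, altLoop2]
      rw [List.drop_eq_nil_of_le (by omega : (pvOnes a L).length ≤ ((((pvOnes a L).length : Nat) : Int) - B).toNat)]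
      simp [pvPowN]
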